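-- pv_equiv track=rewrite | github.com/IRONICBo/LocalChat | adapter/tools/dataset_classifier.py | _has_nested_entities
-- ===== SOURCE A (Python) =====
-- from typing import List, Dict, Tuple
--
-- def _has_nested_entities(entities: List[Dict]) -> bool:
--     """Check if entities are nested (one entity contains another)"""
--     for i, e1 in enumerate(entities):
--         for j, e2 in enumerate(entities):
--             if i == j:
--                 continue
--
--             # Check if e1 is fully contained in e2
--             if (e1.get("start", 0) >= e2.get("start", 0) and
--                 e1.get("end", 0) <= e2.get("end", 0)):
--                 return True
--
--     return False
-- ===== SOURCE B (Python) =====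
-- from typing import List, Dict
--
-- def _has_nested_entities(entities: List[Dict]) -> bool:
--     """Check if entities are nested (one entity contains another)"""
--     # Sort intervals by (start asc, end desc); then some interval is contained
--     # in another iff the end sequence is not strictly increasing, which a single
--     # sweep comparing each end with the previous one detects.
--     ivs = sorted(((e.get("start", 0), e.get("end", 0)) for e in entities),
--                  key=lambda p: (p[0], -p[1]))
--     prev_end = None
--     for _, end in ivs:
--         if prev_end is not None and end <= prev_end:
--             return True
--         prev_end = end
--     return False
-- ===== Notes on version B (the rewrite author's own statement) =====
-- stated objective: alternative
-- what changed: Replaces the all-pairs containment scan with sorting the (start, end) pairs by (start asc, end desc) and a single sweep checking that ends are strictly increasing.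
import Mathlib
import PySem

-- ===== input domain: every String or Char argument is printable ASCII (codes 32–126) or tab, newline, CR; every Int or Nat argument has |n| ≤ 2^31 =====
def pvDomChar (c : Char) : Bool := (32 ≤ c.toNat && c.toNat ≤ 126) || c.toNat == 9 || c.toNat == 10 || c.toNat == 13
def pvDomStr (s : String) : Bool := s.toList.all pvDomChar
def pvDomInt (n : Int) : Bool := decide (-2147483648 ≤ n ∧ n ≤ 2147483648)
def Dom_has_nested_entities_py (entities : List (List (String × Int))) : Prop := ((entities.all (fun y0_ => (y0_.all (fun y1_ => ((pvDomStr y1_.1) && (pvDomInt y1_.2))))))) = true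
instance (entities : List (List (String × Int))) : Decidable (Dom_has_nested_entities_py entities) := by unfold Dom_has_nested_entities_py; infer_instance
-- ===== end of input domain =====

-- B replaces A's all-pairs containment scan by sorting the (start, end) pairs
-- by (start asc, end desc) and a single sweep comparing adjacent ends.

-- ===== PORT A =====
def has_nested_entities_py (entities : List (List (String × Int))) : Bool :=
  (PySem.List.enumerate entities).any (fun ie1 =>
    (PySem.List.enumerate entities).any (fun je2 =>
      if ie1.1 == je2.1 then false
      else
        decide ((PySem.Dict.mk ie1.2).getD "start" 0 ≥ (PySem.Dict.mk je2.2).getD "start" 0) &&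
        decide ((PySem.Dict.mk ie1.2).getD "end" 0 ≤ (PySem.Dict.mk je2.2).getD "end" 0)))

-- ===== PORT B =====
-- the (start, end) pair of one entity dict
def pvKey (e : List (String × Int)) : Int × Int :=
  ((PySem.Dict.mk e).getD "start" 0, (PySem.Dict.mk e).getD "end" 0)

-- the sweep loop of Source B: prev_end as Option Int
def pvSweep : Option Int → List (Int × Int) → Bool
  | _, [] => false
  | none, p :: rest => pvSweep (some p.2) rest
  | some prev, p :: rest => if p.2 ≤ prev then true else pvSweep (some p.2) rest

def has_nested_entities_py_alt (entities : List (List (String × Int))) : Bool :=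
  pvSweep none (PySem.List.sorted2 (entities.map pvKey) (fun p => p.1) (fun p => -p.2))

-- ===== PRECONDITION & SPEC =====
def Spec_has_nested_entities_py (entities : List (List (String × Int))) (out : Bool) : Prop := out = has_nested_entities_py_alt entities
instance (entities : List (List (String × Int))) (out : Bool) : Decidable (Spec_has_nested_entities_py entities out) := by unfold Spec_has_nested_entities_py; infer_instance

-- ===== CLAIM (what is proved, stated in full; the proofs are below) =====
def Claim_equal_has_nested_entities_py : Prop := ∀ (entities : List (List (String × Int))), Dom_has_nested_entities_py entities → Spec_has_nested_entities_py entities (has_nested_entities_py entities)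

-- ===== LEMMAS AND PROOFS =====

-- the boolean comparator sorted2 uses for key (p.1, -p.2)
def pvLt (a b : Int × Int) : Bool :=
  decide (a.1 < b.1) || (!decide (b.1 < a.1) && decide (-a.2 < -b.2))

-- "no containment either way" between two intervals
def pvR (a b : Int × Int) : Prop :=
  ¬ (a.1 ≥ b.1 ∧ a.2 ≤ b.2) ∧ ¬ (b.1 ≥ a.1 ∧ b.2 ≤ a.2)

lemma pvSorted2_eq (xs : List (Int × Int)) :
    PySem.List.sorted2 xs (fun p => p.1) (fun p => -p.2) =
      xs.foldl (fun acc x => PySem.List.insertBy pvLt x acc) [] := rfl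

lemma pvLt_asymm {a b : Int × Int} (h : pvLt a b = true) : pvLt b a = false := by
  simp [pvLt] at h ⊢; omega

lemma pvLt_trans {a b c : Int × Int} (h1 : pvLt a b = true) (h2 : pvLt b c = true) :
    pvLt a c = true := by
  simp [pvLt] at h1 h2 ⊢; omega

lemma pvPairwise_insertBy (x : Int × Int) (l : List (Int × Int))
    (h : l.Pairwise (fun a b => pvLt b a = false)) :
    (PySem.List.insertBy pvLt x l).Pairwise (fun a b => pvLt b a = false) := by
  induction l with
  | nil => simp [PySem.List.insertBy]
  | cons y ys ih =>
    rcases h with - | ⟨hy, hys⟩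
    cases hxy : pvLt x y with
    | true =>
      rw [show PySem.List.insertBy pvLt x (y :: ys) = x :: y :: ys from by
        simp [PySem.List.insertBy, hxy]]
      refine List.Pairwise.cons ?_ (List.Pairwise.cons hy hys)
      intro z hz
      rcases List.mem_cons.mp hz with rfl | hz
      · exact pvLt_asymm hxy
      · cases hzx : pvLt z x with
        | false => rfl
        | true => exact absurd (pvLt_trans hzx hxy) (by simp [hy z hz])
    | false =>
      rw [show PySem.List.insertBy pvLt x (y :: ys) = y :: PySem.List.insertBy pvLt x ys from by
        simp [PySem.List.insertBy, hxy]]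
      refine List.Pairwise.cons ?_ (ih hys)
      intro z hz
      rcases (PySem.List.mem_insertBy _ _ _ _).mp hz with rfl | hz
      · exact hxy
      · exact hy z hz

lemma pvPairwise_sortfold (xs : List (Int × Int)) :
    ∀ acc, acc.Pairwise (fun a b => pvLt b a = false) →
      (xs.foldl (fun acc x => PySem.List.insertBy pvLt x acc) acc).Pairwise
        (fun a b => pvLt b a = false) := by
  induction xs with
  | nil => intro acc h; simpa using h
  | cons x xs ih => intro acc h; exact ih _ (pvPairwise_insertBy x acc h)

lemma pvSweep_some (l : List (Int × Int)) :
    ∀ p, pvSweep (some p) l = false ↔ List.IsChain (· < ·) (p :: l.map Prod.snd) := by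
  induction l with
  | nil => intro p; simp [pvSweep]
  | cons q rest ih =>
    intro p
    by_cases h : q.2 ≤ p
    · simp only [pvSweep, if_pos h, List.map_cons, List.isChain_cons_cons]
      constructor
      · intro hc; cases hc
      · rintro ⟨h1, -⟩; omega
    · simp only [pvSweep, if_neg h, List.map_cons, List.isChain_cons_cons]
      rw [ih]
      have hp : p < q.2 := by omega
      simp [hp]

lemma pvSweep_none (l : List (Int × Int)) :
    pvSweep none l = false ↔ (l.map Prod.snd).IsChain (· < ·) := by
  cases l with
  | nil => simp [pvSweep]
  | cons q rest =>
    show pvSweep (some q.2) rest = false ↔ _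
    rw [pvSweep_some]
    simp

lemma pvA_char (entities : List (List (String × Int))) :
    has_nested_entities_py entities = false ↔
      ∀ (k m : Nat) (hk : k < entities.length) (hm : m < entities.length), k ≠ m →
        ¬ ((pvKey entities[k]).1 ≥ (pvKey entities[m]).1 ∧
           (pvKey entities[k]).2 ≤ (pvKey entities[m]).2) := by
  unfold has_nested_entities_py
  rw [List.any_eq_false]
  constructor
  · intro h k m hk hm hkm hc
    refine absurd ?_ (h _ ((PySem.List.mem_enumerate_iff _ _ _).mpr ⟨k, hk, rfl⟩))
    rw [List.any_eq_true]
    refine ⟨(0 + (m : Int), entities[m]), (PySem.List.mem_enumerate_iff _ _ _).mpr ⟨m, hm, rfl⟩, ?_⟩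
    rw [if_neg (by simp [hkm])]
    simp [pvKey] at hc
    simp [hc.1, hc.2]
  · intro h p hp hinner
    rcases (PySem.List.mem_enumerate_iff _ _ _).mp hp with ⟨k, hk, rfl⟩
    rw [List.any_eq_true] at hinner
    obtain ⟨q, hq, hcond⟩ := hinner
    rcases (PySem.List.mem_enumerate_iff _ _ _).mp hq with ⟨m, hm, rfl⟩
    by_cases hkm : k = m
    · subst hkm; simp at hcond
    · rw [if_neg (by simp [hkm])] at hcond
      simp at hcond
      refine h k m hk hm hkm ?_
      simp [pvKey]
      omega

lemma pvBool_eq_of_false_iff {a b : Bool} (h : a = false ↔ b = false) : a = b := by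
  cases a <;> cases b <;> simp_all

theorem pv_main (entities : List (List (String × Int))) :
    has_nested_entities_py entities = has_nested_entities_py_alt entities := by
  apply pvBool_eq_of_false_iff
  set P := entities.map pvKey with hP
  set S := PySem.List.sorted2 P (fun p => p.1) (fun p => -p.2) with hS
  -- A = false ↔ P pairwise containment-free
  have hPA : has_nested_entities_py entities = false ↔ P.Pairwise pvR := by
    rw [pvA_char, List.pairwise_iff_getElem]
    constructor
    · intro h i j hi hj hij
      rw [hP, List.length_map] at hi hj
      simp only [hP, List.getElem_map]
      exact ⟨h i j hi hj (by omega), h j i hj hi (by omega)⟩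
    · intro h k m hk hm hkm hc
      rcases Nat.lt_or_ge k m with hlt | hge
      · have := h k m (by simp [hP, hk]) (by simp [hP, hm]) hlt
        simp only [hP, List.getElem_map] at this
        exact this.1 hc
      · have hmk : m < k := by omega
        have := h m k (by simp [hP, hm]) (by simp [hP, hk]) hmk
        simp only [hP, List.getElem_map] at this
        exact this.2 hc
  -- transport along the sort permutation
  have hsym : Symmetric pvR := fun a b hab => ⟨hab.2, hab.1⟩
  have hperm : S.Perm P := PySem.List.sorted2_perm P (fun p => p.1) (fun p => -p.2) false
  -- the sorted list is pairwise key-ordered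
  have hkeyS : S.Pairwise (fun a b => pvLt b a = false) := by
    rw [hS, pvSorted2_eq]
    exact pvPairwise_sortfold P [] List.Pairwise.nil
  -- under key order, containment-freedom is strict increase of ends
  have hRS : S.Pairwise pvR ↔ S.Pairwise (fun a b => a.2 < b.2) := by
    rw [List.pairwise_iff_getElem, List.pairwise_iff_getElem]
    have hk := List.pairwise_iff_getElem.mp hkeyS
    constructor
    · intro h i j hi hj hij
      have h1 := hk i j hi hj hij
      have h2 := h i j hi hj hij
      unfold pvR at h2
      simp [pvLt] at h1
      omega
    · intro h i j hi hj hij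
      have h1 := hk i j hi hj hij
      have h2 := h i j hi hj hij
      unfold pvR
      simp [pvLt] at h1
      omega
  -- B = false ↔ ends strictly increasing along S
  have hB : has_nested_entities_py_alt entities = false ↔
      (S.map Prod.snd).Pairwise (· < ·) := by
    unfold has_nested_entities_py_alt
    rw [← hP, ← hS, pvSweep_none, List.isChain_iff_pairwise]
  have h2 : (S.map Prod.snd).Pairwise (fun a b : Int => a < b) ↔
      S.Pairwise (fun a b => a.2 < b.2) := List.pairwise_map
  rw [hPA, hB, h2, ← hRS]
  exact (List.Perm.pairwise_iff (R := pvR) (fun h => hsym h) hperm).symm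

-- ===== VERDICT (by name: the statement is the Claim_ definition above) =====
theorem has_nested_entities_py_spec : Claim_equal_has_nested_entities_py := by
  intro entities _
  unfold Spec_has_nested_entities_py
  exact pv_main entities
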